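-- pv_equiv track=rewrite | github.com/guilhermefay/helio-job-robot | core/services/agente_0_diagnostico.py | _priorizar_gaps
-- ===== SOURCE A (Python) =====
-- from typing import Dict, List, Optional, Any, Tuple
--
-- def _priorizar_gaps(gaps_criticos: List[str]) -> List[str]:
--     """Prioriza gaps críticos por ordem de importância"""
--     # Priorização baseada na metodologia Carolina Martins
--     ordem_prioridade = [
--         "experiencia_area_especifica",
--         "competencia_lideranca",
--         "competencia_gestao",
--         "formacao_area_especifica",
--         "competencia_excel",
--         "competencia_ingles"
--     ]
--
--     gaps_priorizados = []
--
--     # Adiciona gaps na ordem de prioridade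
--     for prioridade in ordem_prioridade:
--         if prioridade in gaps_criticos:
--             gaps_priorizados.append(prioridade)
--
--     # Adiciona gaps restantes
--     for gap in gaps_criticos:
--         if gap not in gaps_priorizados:
--             gaps_priorizados.append(gap)
--
--     return gaps_priorizados
-- ===== SOURCE B (Python) =====
-- from typing import List
--
-- def _priorizar_gaps(gaps_criticos: List[str]) -> List[str]:
--     """Prioriza gaps criticos: itens da ordem fixa primeiro, resto na ordem de aparicao."""
--     ordem_prioridade = [
--         "experiencia_area_especifica",
--         "competencia_lideranca",
--         "competencia_gestao",
--         "formacao_area_especifica",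
--         "competencia_excel",
--         "competencia_ingles"
--     ]
--     indice = {p: i for i, p in enumerate(ordem_prioridade)}
--     sem_duplicatas = list(dict.fromkeys(gaps_criticos))
--     return sorted(sem_duplicatas, key=lambda g: indice.get(g, len(ordem_prioridade)))
-- ===== Notes on version B (the rewrite author's own statement) =====
-- stated objective: faster
-- what changed: Replaces the two membership-scanning append loops by deduplicating with dict.fromkeys and one stable sorted() call keyed by a precomputed priority index (default = len(ordem)), relying on sort stability for the non-priority tail.
import Mathlib
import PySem

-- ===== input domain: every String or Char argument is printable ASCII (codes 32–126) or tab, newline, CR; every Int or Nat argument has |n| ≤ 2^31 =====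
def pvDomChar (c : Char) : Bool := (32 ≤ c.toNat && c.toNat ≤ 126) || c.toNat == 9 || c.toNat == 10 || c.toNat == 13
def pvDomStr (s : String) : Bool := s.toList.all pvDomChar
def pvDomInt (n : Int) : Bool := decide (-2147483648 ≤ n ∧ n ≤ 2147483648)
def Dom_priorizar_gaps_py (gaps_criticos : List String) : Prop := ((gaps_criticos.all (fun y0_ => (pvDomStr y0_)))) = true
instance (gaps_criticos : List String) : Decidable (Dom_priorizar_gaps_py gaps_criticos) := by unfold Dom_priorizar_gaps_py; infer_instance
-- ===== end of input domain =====

-- B replaces A's two membership-scanning append loops by dedup (dict.fromkeys) plus one stable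
-- sort keyed by a precomputed priority index; the return values are proved equal on all inputs.

-- ===== PORT A =====
def pvOrdem : List String :=
  ["experiencia_area_especifica", "competencia_lideranca", "competencia_gestao",
   "formacao_area_especifica", "competencia_excel", "competencia_ingles"]

def priorizar_gaps_py (gaps_criticos : List String) : List String :=
  -- for prioridade in ordem_prioridade: if prioridade in gaps_criticos: gaps_priorizados.append(prioridade)
  let gaps_priorizados :=
    pvOrdem.foldl (fun acc p => if p ∈ gaps_criticos then acc ++ [p] else acc) []
  -- for gap in gaps_criticos: if gap not in gaps_priorizados: gaps_priorizados.append(gap)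
  gaps_criticos.foldl (fun acc g => if g ∈ acc then acc else acc ++ [g]) gaps_priorizados

-- ===== PORT B =====
-- indice = {p: i for i, p in enumerate(ordem_prioridade)}
def pvIndice : PySem.Dict String Int :=
  (PySem.List.enumerate pvOrdem 0).foldl (fun d iv => d.insert iv.2 iv.1) PySem.Dict.empty

-- key=lambda g: indice.get(g, len(ordem_prioridade))
def pvKey (g : String) : Int := PySem.Dict.getD pvIndice g (pvOrdem.length : Int)

-- sorted(list(dict.fromkeys(gaps_criticos)), key=...)
def priorizar_gaps_py_alt (gaps_criticos : List String) : List String :=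
  PySem.List.sorted (PySem.List.dedup gaps_criticos) pvKey false

-- ===== PRECONDITION & SPEC =====
def Spec_priorizar_gaps_py (gaps_criticos : List String) (out : List String) : Prop := out = priorizar_gaps_py_alt gaps_criticos
instance (gaps_criticos : List String) (out : List String) : Decidable (Spec_priorizar_gaps_py gaps_criticos out) := by unfold Spec_priorizar_gaps_py; infer_instance

-- ===== CLAIM (what is proved, stated in full; the proofs are below) =====
def Claim_equal_priorizar_gaps_py : Prop := ∀ (gaps_criticos : List String), Dom_priorizar_gaps_py gaps_criticos → Spec_priorizar_gaps_py gaps_criticos (priorizar_gaps_py gaps_criticos)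

-- ===== LEMMAS AND PROOFS =====

-- the common normal form both programs reduce to: present priorities in priority order,
-- then the deduplicated non-priority gaps in first-appearance order
def pvTarget (ys : List String) : List String :=
  pvOrdem.filter (fun p => decide (p ∈ ys)) ++ ys.filter (fun g => !pvOrdem.contains g)

lemma pvKey_of_not_mem (x : String) (hx : x ∉ pvOrdem) : pvKey x = 6 := by
  simp [pvOrdem] at hx
  obtain ⟨h1,h2,h3,h4,h5,h6⟩ := hx
  have e1 : ("experiencia_area_especifica" == x) = false := by rw [beq_eq_false_iff_ne]; exact fun h => h1 h.symm
  have e2 : ("competencia_lideranca" == x) = false := by rw [beq_eq_false_iff_ne]; exact fun h => h2 h.symm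
  have e3 : ("competencia_gestao" == x) = false := by rw [beq_eq_false_iff_ne]; exact fun h => h3 h.symm
  have e4 : ("formacao_area_especifica" == x) = false := by rw [beq_eq_false_iff_ne]; exact fun h => h4 h.symm
  have e5 : ("competencia_excel" == x) = false := by rw [beq_eq_false_iff_ne]; exact fun h => h5 h.symm
  have e6 : ("competencia_ingles" == x) = false := by rw [beq_eq_false_iff_ne]; exact fun h => h6 h.symm
  simp [pvKey, pvIndice, pvOrdem, PySem.Dict.getD, PySem.Dict.get?,
        PySem.List.enumerate, PySem.Dict.insert, PySem.Dict.empty, List.find?,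
        e1, e2, e3, e4, e5, e6]

lemma pvKey_le_six (x : String) : pvKey x ≤ 6 := by
  by_cases hx : x ∈ pvOrdem
  · simp [pvOrdem] at hx
    rcases hx with h|h|h|h|h|h <;> subst h <;> decide
  · rw [pvKey_of_not_mem x hx]

-- insertion into as ++ bs where x belongs exactly between as and bs
lemma insertBy_split (bef : String → String → Bool) (y : String) (as bs : List String)
    (ha : ∀ a ∈ as, bef y a = false) (hb : ∀ b ∈ bs, bef y b = true) :
    PySem.List.insertBy bef y (as ++ bs) = as ++ y :: bs := by
  induction as with
  | nil =>
    simp only [List.nil_append]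
    cases bs with
    | nil => simp [PySem.List.insertBy]
    | cons b bs' => simp [PySem.List.insertBy, hb b (by simp)]
  | cons a as' ih =>
    have hfa : bef y a = false := ha a (by simp)
    simp [PySem.List.insertBy, hfa, ih (fun a' h' => ha a' (by simp [h']))]

-- inserting a priority element splits pvOrdem at that element
lemma insert_step (pre post : List String) (y : String) (ys : List String)
    (hsplit : pvOrdem = pre ++ y :: post)
    (hy : y ∉ ys)
    (hpre : ∀ a ∈ pre, decide (pvKey y < pvKey a) = false)
    (hpost : ∀ b ∈ post, decide (pvKey y < pvKey b) = true)
    (hypre : y ∉ pre)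
    (hypost : y ∉ post)
    (hyk : pvKey y < 6) :
    PySem.List.insertBy (fun a b => decide (pvKey a < pvKey b)) y (pvTarget ys)
      = pvTarget (ys ++ [y]) := by
  unfold pvTarget
  rw [hsplit]
  have hfilter : (pre ++ y :: post).filter (fun p => decide (p ∈ ys))
      = pre.filter (fun p => decide (p ∈ ys)) ++ post.filter (fun p => decide (p ∈ ys)) := by
    simp [List.filter_append, hy]
  rw [hfilter, List.append_assoc]
  rw [insertBy_split _ y _ _
    (fun a ha => hpre a (List.mem_of_mem_filter ha))
    (by
      intro b hb
      rcases List.mem_append.1 hb with h | h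
      · exact hpost b (List.mem_of_mem_filter h)
      · have hc := List.of_mem_filter h
        have hbn : b ∉ pvOrdem := by
          rw [hsplit]
          intro hmem
          simp [List.contains_eq_mem, hmem] at hc
        rw [pvKey_of_not_mem b hbn]
        exact decide_eq_true hyk)]
  have h1 : pre.filter (fun p => decide (p ∈ ys ++ [y])) = pre.filter (fun p => decide (p ∈ ys)) := by
    apply List.filter_congr
    intro p hp
    have : p ≠ y := fun h => hypre (h ▸ hp)
    simp [List.mem_append, this]
  have h2 : post.filter (fun p => decide (p ∈ ys ++ [y])) = post.filter (fun p => decide (p ∈ ys)) := by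
    apply List.filter_congr
    intro p hp
    have : p ≠ y := fun h => hypost (h ▸ hp)
    simp [List.mem_append, this]
  have h3 : (ys ++ [y]).filter (fun g => !(pre ++ y :: post).contains g) = ys.filter (fun g => !(pre ++ y :: post).contains g) := by
    simp [List.filter_append, List.contains_eq_mem]
  rw [h3, List.filter_append, List.filter_cons, h1, h2]
  simp [List.mem_append]

-- the stable sort of a duplicate-free list is exactly pvTarget
lemma sorted_target (ys : List String) (h : ys.Nodup) :
    PySem.List.sorted ys pvKey false = pvTarget ys := by
  induction ys using List.reverseRecOn with
  | nil => simp [PySem.List.sorted, pvTarget, pvOrdem]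
  | append_singleton ys y ih =>
    have hnd : ys.Nodup := (List.nodup_append.1 h).1
    have hy : y ∉ ys := by
      intro hmem
      exact ((List.nodup_append.1 h).2.2 y hmem y (by simp)) rfl
    have hstep : PySem.List.sorted (ys ++ [y]) pvKey false
        = PySem.List.insertBy (fun a b => decide (pvKey a < pvKey b)) y
            (PySem.List.sorted ys pvKey false) := by
      rw [PySem.List.sorted_eq_foldl_insertBy, PySem.List.sorted_eq_foldl_insertBy,
        List.foldl_append]
      rfl
    rw [hstep, ih hnd]
    by_cases hmem : y ∈ pvOrdem
    · simp only [pvOrdem, List.mem_cons, List.not_mem_nil, or_false] at hmem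
      rcases hmem with h'|h'|h'|h'|h'|h' <;> subst h'
      · exact insert_step [] _ _ ys rfl hy (by decide) (by decide) (by decide) (by decide) (by decide)
      · exact insert_step ["experiencia_area_especifica"] _ _ ys rfl hy (by decide) (by decide) (by decide) (by decide) (by decide)
      · exact insert_step ["experiencia_area_especifica","competencia_lideranca"] _ _ ys rfl hy (by decide) (by decide) (by decide) (by decide) (by decide)
      · exact insert_step ["experiencia_area_especifica","competencia_lideranca","competencia_gestao"] _ _ ys rfl hy (by decide) (by decide) (by decide) (by decide) (by decide)
      · exact insert_step ["experiencia_area_especifica","competencia_lideranca","competencia_gestao","formacao_area_especifica"] _ _ ys rfl hy (by decide) (by decide) (by decide) (by decide) (by decide)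
      · exact insert_step ["experiencia_area_especifica","competencia_lideranca","competencia_gestao","formacao_area_especifica","competencia_excel"] _ _ ys rfl hy (by decide) (by decide) (by decide) (by decide) (by decide)
    · -- y not a priority: its key is 6, maximal, so it goes to the end
      have hk6 : pvKey y = 6 := pvKey_of_not_mem y hmem
      rw [PySem.List.insertBy_of_forall_not_before]
      · unfold pvTarget
        have h1 : pvOrdem.filter (fun p => decide (p ∈ ys ++ [y])) = pvOrdem.filter (fun p => decide (p ∈ ys)) := by
          apply List.filter_congr
          intro p hp
          have : p ≠ y := fun h => hmem (h ▸ hp)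
          simp [List.mem_append, this]
        rw [h1, List.filter_append, List.filter_cons]
        simp [List.contains_eq_mem, hmem]
      · intro a ha
        unfold pvTarget at ha
        rcases List.mem_append.1 ha with h' | h'
        · have : pvKey a ≤ 6 := pvKey_le_six a
          simp [hk6]; omega
        · have hc := List.of_mem_filter h'
          have han : a ∉ pvOrdem := by
            intro hmem'
            simp [List.contains_eq_mem, hmem'] at hc
          rw [pvKey_of_not_mem a han]
          simp [hk6]

-- A's second loop, started from any accumulator, in terms of the same loop started from []
lemma rest_loop (gaps : List String) : ∀ acc : List String,
    gaps.foldl (fun a g => if g ∈ a then a else a ++ [g]) acc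
      = acc ++ (gaps.foldl (fun a g => if g ∈ a then a else a ++ [g]) []).filter
          (fun g => decide (g ∉ acc)) := by
  induction gaps with
  | nil => intro acc; simp
  | cons g gs ih =>
    intro acc
    simp only [List.foldl_cons]
    have hg : (if g ∈ ([] : List String) then ([] : List String) else [] ++ [g]) = [g] := by simp
    rw [hg]
    have hsingle : gs.foldl (fun a g => if g ∈ a then a else a ++ [g]) [g]
        = [g] ++ (gs.foldl (fun a g => if g ∈ a then a else a ++ [g]) []).filter
            (fun x => decide (x ∉ ([g] : List String))) := ih [g]
    by_cases hga : g ∈ acc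
    · rw [if_pos hga, ih acc, hsingle]
      rw [List.filter_append]
      simp only [List.filter_cons]
      have : (decide (g ∉ acc)) = false := by simp [hga]
      simp only [this, List.filter_filter]
      simp only [List.filter_nil, Bool.false_eq_true, if_false, List.nil_append]
      apply congrArg
      apply List.filter_congr
      intro x _
      by_cases hx : x ∈ acc
      · simp [hx]
      · have : x ≠ g := fun h => hx (h ▸ hga)
        simp [hx, this]
    · rw [if_neg hga, ih (acc ++ [g]), hsingle]
      rw [List.filter_append, List.filter_cons]
      have : (decide (g ∉ acc)) = true := by simp [hga]
      simp only [this, List.filter_filter, if_true, List.filter_nil, List.nil_append,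
        List.append_assoc, List.cons_append]
      congr 2
      apply List.filter_congr
      intro x _
      by_cases hx : x = g
      · simp [hx]
      · simp [hx, List.mem_append]

-- A's second loop from [] is exactly dict.fromkeys deduplication
lemma fold_eq_dedup (gaps : List String) :
    gaps.foldl (fun a g => if g ∈ a then a else a ++ [g]) [] = PySem.List.dedup gaps := by
  have h : ∀ (a : List String) (g : String),
      (if g ∈ a then a else a ++ [g]) = PySem.Set.add a g := by
    intro a g; simp [PySem.Set.add, List.contains_eq_mem]
  simp only [h]
  rfl

-- ===== VERDICT (by name: the statement is the Claim_ definition above) =====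
theorem priorizar_gaps_py_spec : Claim_equal_priorizar_gaps_py := by
  intro gaps _
  unfold Spec_priorizar_gaps_py
  have hB : priorizar_gaps_py_alt gaps = pvTarget (PySem.List.dedup gaps) :=
    sorted_target _ (PySem.List.nodup_dedup gaps)
  have hF : pvOrdem.foldl (fun acc p => if p ∈ gaps then acc ++ [p] else acc) []
      = pvOrdem.filter (fun p => decide (p ∈ gaps)) := by
    rw [PySem.List.foldl_append_ite_eq_filter]
    simp
  have hA : priorizar_gaps_py gaps
      = pvOrdem.filter (fun p => decide (p ∈ gaps))
        ++ (PySem.List.dedup gaps).filter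
            (fun g => decide (g ∉ pvOrdem.filter (fun p => decide (p ∈ gaps)))) := by
    show gaps.foldl (fun acc g => if g ∈ acc then acc else acc ++ [g])
        (pvOrdem.foldl (fun acc p => if p ∈ gaps then acc ++ [p] else acc) []) = _
    rw [hF, rest_loop, fold_eq_dedup]
  rw [hA, hB]
  unfold pvTarget
  have h1 : pvOrdem.filter (fun p => decide (p ∈ PySem.List.dedup gaps))
      = pvOrdem.filter (fun p => decide (p ∈ gaps)) := by
    apply List.filter_congr
    intro p _
    simp [PySem.List.dedup, PySem.Set.mem_ofList]
  have h2 : (PySem.List.dedup gaps).filter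
        (fun g => decide (g ∉ pvOrdem.filter (fun p => decide (p ∈ gaps))))
      = (PySem.List.dedup gaps).filter (fun g => !pvOrdem.contains g) := by
    apply List.filter_congr
    intro g hg
    have hgg : g ∈ gaps := (PySem.List.mem_dedup gaps g).1 hg
    by_cases hp : g ∈ pvOrdem
    · simp [List.mem_filter, hp, hgg, List.contains_eq_mem]
    · simp [List.mem_filter, hp, List.contains_eq_mem]
  rw [h1, h2]
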